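-- pv_equiv track=rewrite | github.com/valinurovdenis/InfoPoisk | SearchDoc/varbyte.py | decode
-- ===== SOURCE A (Python) =====
-- def decode(array):
--     num, res = 0, 0
--     result = []
--     for cur in array:
--         if cur < 128:
--             res = 128 * res + cur
--         else:
--             res = 128 * res + (cur - 128)
--             num += res
--             result.append(num)
--             res = 0
--
--     return result
-- ===== SOURCE B (Python) =====
-- def decode(array):
--     # pass 1: decode VarByte groups into a list of gaps (unterminated tail dropped)
--     gaps = []
--     res = 0
--     for cur in array:
--         if cur < 128:
--             res = 128 * res + cur
--         else:
--             gaps.append(128 * res + (cur - 128))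
--             res = 0
--     # pass 2: cumulative sum of the gaps
--     result = []
--     total = 0
--     for g in gaps:
--         total += g
--         result.append(total)
--     return result
-- ===== Notes on version B (the rewrite author's own statement) =====
-- stated objective: alternative
-- what changed: Single fused decode-and-accumulate loop over (num,res) is split into two passes: one loop decoding the gap list, then a separate running-sum loop over the gaps.
import Mathlib
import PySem

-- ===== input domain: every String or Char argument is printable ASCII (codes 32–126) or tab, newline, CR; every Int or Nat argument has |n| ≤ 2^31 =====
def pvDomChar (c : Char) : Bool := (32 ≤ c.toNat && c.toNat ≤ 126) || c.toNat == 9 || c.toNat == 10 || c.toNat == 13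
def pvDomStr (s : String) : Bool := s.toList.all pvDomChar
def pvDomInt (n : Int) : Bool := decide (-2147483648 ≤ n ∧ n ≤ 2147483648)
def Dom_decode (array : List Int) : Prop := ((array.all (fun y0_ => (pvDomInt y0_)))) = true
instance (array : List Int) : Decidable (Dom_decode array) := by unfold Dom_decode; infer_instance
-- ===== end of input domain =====

-- B splits A's fused decode-and-accumulate loop into two passes (decode gaps, then running sum); equal return value proved.

-- ===== PORT A =====
-- loop body of A: state is (num, res, result)
def decodeStep (st : Int × Int × List Int) (cur : Int) : Int × Int × List Int :=
  if cur < 128 then (st.1, 128 * st.2.1 + cur, st.2.2)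
  else (st.1 + (128 * st.2.1 + (cur - 128)), 0,
        st.2.2 ++ [st.1 + (128 * st.2.1 + (cur - 128))])

def decode (array : List Int) : List Int :=
  (array.foldl decodeStep (0, 0, [])).2.2

-- ===== PORT B =====
-- pass 1 loop body: state is (res, gaps)
def gapStep (st : Int × List Int) (cur : Int) : Int × List Int :=
  if cur < 128 then (128 * st.1 + cur, st.2)
  else (0, st.2 ++ [128 * st.1 + (cur - 128)])

-- pass 2 loop body: state is (total, result)
def sumStep (st : Int × List Int) (g : Int) : Int × List Int :=
  (st.1 + g, st.2 ++ [st.1 + g])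

def decode_alt (array : List Int) : List Int :=
  ((array.foldl gapStep (0, [])).2.foldl sumStep (0, [])).2

-- ===== PRECONDITION & SPEC =====
def Spec_decode (array : List Int) (out : List Int) : Prop := out = decode_alt array
instance (array : List Int) (out : List Int) : Decidable (Spec_decode array out) := by unfold Spec_decode; infer_instance

-- ===== CLAIM (what is proved, stated in full; the proofs are below) =====
def Claim_equal_decode : Prop := ∀ (array : List Int), Dom_decode array → Spec_decode array (decode array)

-- ===== LEMMAS AND PROOFS =====
-- the gap accumulator only grows by appending; the rest is independent of it
theorem gap_acc (arr : List Int) : ∀ (res : Int) (gs : List Int),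
    arr.foldl gapStep (res, gs)
      = ((arr.foldl gapStep (res, [])).1, gs ++ (arr.foldl gapStep (res, [])).2) := by
  induction arr with
  | nil => intro res gs; simp
  | cons cur tl ih =>
    intro res gs
    simp only [List.foldl_cons, gapStep]
    split_ifs with h
    · exact ih _ gs
    · rw [ih _ (gs ++ _), ih _ ([] ++ _)]
      simp

theorem key (arr : List Int) : ∀ (num res : Int) (result : List Int),
    (arr.foldl decodeStep (num, res, result)).2.2
      = ((arr.foldl gapStep (res, [])).2.foldl sumStep (num, result)).2 := by
  induction arr with
  | nil => intro num res result; simp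
  | cons cur tl ih =>
    intro num res result
    simp only [List.foldl_cons, decodeStep, gapStep]
    split_ifs with h
    · exact ih _ _ _
    · rw [show ([] ++ [128 * res + (cur - 128)]) = [128 * res + (cur - 128)] by simp,
        gap_acc tl 0 [128 * res + (cur - 128)], ih]
      simp [sumStep]

-- ===== VERDICT (by name: the statement is the Claim_ definition above) =====
theorem decode_spec : Claim_equal_decode := by
  intro array _
  unfold Spec_decode decode decode_alt
  exact key array 0 0 []
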